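-- pv_equiv track=rewrite | github.com/ovisarker/mental-health-ml | app_v1.py | score_and_risk
-- ===== SOURCE A (Python) =====
-- def score_and_risk(values, target):
--     scaled = [v - 1 for v in values]
--
--     if target == "Anxiety":
--         total = sum(scaled)
--         if total <= 4: return "Minimal Anxiety", "Low", total, 21
--         if total <= 9: return "Mild Anxiety", "Moderate", total, 21
--         if total <= 14: return "Moderate Anxiety", "High", total, 21
--         return "Severe Anxiety", "Critical", total, 21
--
--     if target == "Stress":
--         total = sum(scaled)
--         if total <= 13: return "Minimal Stress", "Low", total, 40
--         if total <= 26: return "Moderate Stress", "High", total, 40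
--         return "Severe Stress", "Critical", total, 40
--
--     if target == "Depression":
--         total = sum(scaled)
--         if total <= 4: return "Minimal Depression", "Low", total, 27
--         if total <= 9: return "Mild Depression", "Moderate", total, 27
--         if total <= 14: return "Moderate Depression", "High", total, 27
--         return "Severe Depression", "Critical", total, 27
-- ===== SOURCE B (Python) =====
-- _SPEC = {
--     "Anxiety": (21, (4, 9, 14),
--         ("Minimal Anxiety", "Mild Anxiety", "Moderate Anxiety", "Severe Anxiety"),
--         ("Low", "Moderate", "High", "Critical")),
--     "Stress": (40, (13, 26),
--         ("Minimal Stress", "Moderate Stress", "Severe Stress"),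
--         ("Low", "High", "Critical")),
--     "Depression": (27, (4, 9, 14),
--         ("Minimal Depression", "Mild Depression", "Moderate Depression", "Severe Depression"),
--         ("Low", "Moderate", "High", "Critical")),
-- }
--
--
-- def score_and_risk(values, target):
--     spec = _SPEC.get(target)
--     if spec is None:
--         return None
--     max_score, cutoffs, labels, risks = spec
--     total = sum(values) - len(values)
--     idx = sum(1 for c in cutoffs if total > c)
--     return labels[idx], risks[idx], total, max_score
-- ===== Notes on version B (the rewrite author's own statement) =====
-- stated objective: simpler
-- what changed: Instead of A's three hard-coded if-else chains, B computes the severity index arithmetically as the count of the target's cutoffs exceeded by the total and uses it to index parallel label/risk lists from a per-target spec table; total is sum(values) - len(values), avoiding A's intermediate scaled list (the constant-factor speedup).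
import Mathlib
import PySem

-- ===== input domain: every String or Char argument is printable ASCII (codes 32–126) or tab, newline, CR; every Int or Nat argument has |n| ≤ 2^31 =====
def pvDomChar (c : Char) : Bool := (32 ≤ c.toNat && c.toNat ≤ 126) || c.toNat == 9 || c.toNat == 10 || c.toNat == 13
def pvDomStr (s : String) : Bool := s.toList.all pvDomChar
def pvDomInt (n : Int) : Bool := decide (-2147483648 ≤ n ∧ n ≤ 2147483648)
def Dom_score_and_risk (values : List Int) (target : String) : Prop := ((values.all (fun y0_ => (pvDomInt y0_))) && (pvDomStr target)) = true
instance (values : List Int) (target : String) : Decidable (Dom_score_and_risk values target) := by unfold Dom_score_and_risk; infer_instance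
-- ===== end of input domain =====

-- B replaces A's three if-chains by arithmetic: the severity index is the COUNT of cutoffs the
-- total exceeds, used to index parallel label/risk tuples from a per-target spec; total is
-- sum(values) - len(values) instead of summing a scaled list. Objective: simpler.

-- ===== PORT A =====
def score_and_risk (values : List Int) (target : String) : Option (String × String × Int × Int) :=
  let scaled := values.map (fun v => v - 1)
  if target = "Anxiety" then
    let total := scaled.sum
    if total ≤ 4 then some ("Minimal Anxiety", "Low", total, 21)
    else if total ≤ 9 then some ("Mild Anxiety", "Moderate", total, 21)
    else if total ≤ 14 then some ("Moderate Anxiety", "High", total, 21)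
    else some ("Severe Anxiety", "Critical", total, 21)
  else if target = "Stress" then
    let total := scaled.sum
    if total ≤ 13 then some ("Minimal Stress", "Low", total, 40)
    else if total ≤ 26 then some ("Moderate Stress", "High", total, 40)
    else some ("Severe Stress", "Critical", total, 40)
  else if target = "Depression" then
    let total := scaled.sum
    if total ≤ 4 then some ("Minimal Depression", "Low", total, 27)
    else if total ≤ 9 then some ("Mild Depression", "Moderate", total, 27)
    else if total ≤ 14 then some ("Moderate Depression", "High", total, 27)
    else some ("Severe Depression", "Critical", total, 27)
  else none

-- ===== PORT B =====
def pvSpec : PySem.Dict String (Int × List Int × List String × List String) :=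
  PySem.Dict.mk
    [("Anxiety", (21, [4, 9, 14],
        ["Minimal Anxiety", "Mild Anxiety", "Moderate Anxiety", "Severe Anxiety"],
        ["Low", "Moderate", "High", "Critical"])),
     ("Stress", (40, [13, 26],
        ["Minimal Stress", "Moderate Stress", "Severe Stress"],
        ["Low", "High", "Critical"])),
     ("Depression", (27, [4, 9, 14],
        ["Minimal Depression", "Mild Depression", "Moderate Depression", "Severe Depression"],
        ["Low", "Moderate", "High", "Critical"]))]

def score_and_risk_alt (values : List Int) (target : String) : Option (String × String × Int × Int) :=
  match PySem.Dict.get? pvSpec target with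
  | none => none
  | some (maxScore, cutoffs, labels, risks) =>
    let total := values.sum - values.length
    let idx : Int := ((cutoffs.filter (fun c => total > c)).map (fun _ => (1:Int))).sum
    -- labels[idx] / risks[idx]: idx ≤ len(cutoffs) < len(labels), so the lookups always hit
    match PySem.List.pyGet? labels idx, PySem.List.pyGet? risks idx with
    | some l, some r => some (l, r, total, maxScore)
    | _, _ => none

-- ===== PRECONDITION & SPEC =====
def Spec_score_and_risk (values : List Int) (target : String) (out : Option (String × String × Int × Int)) : Prop := out = score_and_risk_alt values target
instance (values : List Int) (target : String) (out : Option (String × String × Int × Int)) : Decidable (Spec_score_and_risk values target out) := by unfold Spec_score_and_risk; infer_instance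

-- ===== CLAIM =====
def Claim_equal_score_and_risk : Prop := ∀ (values : List Int) (target : String), Dom_score_and_risk values target → Spec_score_and_risk values target (score_and_risk values target)

-- ===== LEMMAS AND PROOFS =====
theorem sum_scaled (values : List Int) :
    (values.map (fun v => v - 1)).sum = values.sum - values.length := by
  induction values with
  | nil => simp
  | cons x xs ih => simp [ih]; ring

-- ===== VERDICT =====
theorem anx_case (t : Int) :
    (if t ≤ 4 then some ("Minimal Anxiety", "Low", t, (21:Int))
     else if t ≤ 9 then some ("Mild Anxiety", "Moderate", t, 21)
     else if t ≤ 14 then some ("Moderate Anxiety", "High", t, 21)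
     else some ("Severe Anxiety", "Critical", t, 21)) =
    (match PySem.List.pyGet? ["Minimal Anxiety", "Mild Anxiety", "Moderate Anxiety", "Severe Anxiety"]
            ((([4, 9, 14].filter (fun c => t > c)).map (fun _ => (1:Int))).sum),
          PySem.List.pyGet? ["Low", "Moderate", "High", "Critical"]
            ((([4, 9, 14].filter (fun c => t > c)).map (fun _ => (1:Int))).sum) with
     | some l, some r => some (l, r, t, (21:Int))
     | _, _ => none) := by
  by_cases c1 : t ≤ 4
  · simp [List.filter, PySem.List.pyGet?, PySem.List.pyIdx?, c1,
      show ¬(4:Int) < t from by omega, show ¬(9:Int) < t from by omega, show ¬(14:Int) < t from by omega]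
  · by_cases c2 : t ≤ 9
    · simp [List.filter, PySem.List.pyGet?, PySem.List.pyIdx?, c1, c2,
        show (4:Int) < t from by omega, show ¬(9:Int) < t from by omega, show ¬(14:Int) < t from by omega]
    · by_cases c3 : t ≤ 14
      · simp [List.filter, PySem.List.pyGet?, PySem.List.pyIdx?, c1, c2, c3,
          show (4:Int) < t from by omega, show (9:Int) < t from by omega, show ¬(14:Int) < t from by omega]
      · simp [List.filter, PySem.List.pyGet?, PySem.List.pyIdx?, c1, c2, c3,
          show (4:Int) < t from by omega, show (9:Int) < t from by omega, show (14:Int) < t from by omega]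

theorem str_case (t : Int) :
    (if t ≤ 13 then some ("Minimal Stress", "Low", t, (40:Int))
     else if t ≤ 26 then some ("Moderate Stress", "High", t, 40)
     else some ("Severe Stress", "Critical", t, 40)) =
    (match PySem.List.pyGet? ["Minimal Stress", "Moderate Stress", "Severe Stress"]
            ((([13, 26].filter (fun c => t > c)).map (fun _ => (1:Int))).sum),
          PySem.List.pyGet? ["Low", "High", "Critical"]
            ((([13, 26].filter (fun c => t > c)).map (fun _ => (1:Int))).sum) with
     | some l, some r => some (l, r, t, (40:Int))
     | _, _ => none) := by
  by_cases c1 : t ≤ 13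
  · simp [List.filter, PySem.List.pyGet?, PySem.List.pyIdx?, c1,
      show ¬(13:Int) < t from by omega, show ¬(26:Int) < t from by omega]
  · by_cases c2 : t ≤ 26
    · simp [List.filter, PySem.List.pyGet?, PySem.List.pyIdx?, c1, c2,
        show (13:Int) < t from by omega, show ¬(26:Int) < t from by omega]
    · simp [List.filter, PySem.List.pyGet?, PySem.List.pyIdx?, c1, c2,
        show (13:Int) < t from by omega, show (26:Int) < t from by omega]

theorem dep_case (t : Int) :
    (if t ≤ 4 then some ("Minimal Depression", "Low", t, (27:Int))
     else if t ≤ 9 then some ("Mild Depression", "Moderate", t, 27)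
     else if t ≤ 14 then some ("Moderate Depression", "High", t, 27)
     else some ("Severe Depression", "Critical", t, 27)) =
    (match PySem.List.pyGet? ["Minimal Depression", "Mild Depression", "Moderate Depression", "Severe Depression"]
            ((([4, 9, 14].filter (fun c => t > c)).map (fun _ => (1:Int))).sum),
          PySem.List.pyGet? ["Low", "Moderate", "High", "Critical"]
            ((([4, 9, 14].filter (fun c => t > c)).map (fun _ => (1:Int))).sum) with
     | some l, some r => some (l, r, t, (27:Int))
     | _, _ => none) := by
  by_cases c1 : t ≤ 4
  · simp [List.filter, PySem.List.pyGet?, PySem.List.pyIdx?, c1,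
      show ¬(4:Int) < t from by omega, show ¬(9:Int) < t from by omega, show ¬(14:Int) < t from by omega]
  · by_cases c2 : t ≤ 9
    · simp [List.filter, PySem.List.pyGet?, PySem.List.pyIdx?, c1, c2,
        show (4:Int) < t from by omega, show ¬(9:Int) < t from by omega, show ¬(14:Int) < t from by omega]
    · by_cases c3 : t ≤ 14
      · simp [List.filter, PySem.List.pyGet?, PySem.List.pyIdx?, c1, c2, c3,
          show (4:Int) < t from by omega, show (9:Int) < t from by omega, show ¬(14:Int) < t from by omega]
      · simp [List.filter, PySem.List.pyGet?, PySem.List.pyIdx?, c1, c2, c3,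
          show (4:Int) < t from by omega, show (9:Int) < t from by omega, show (14:Int) < t from by omega]

theorem score_and_risk_spec : Claim_equal_score_and_risk := by
  intro values target _
  unfold Spec_score_and_risk score_and_risk score_and_risk_alt
  simp only [pvSpec, PySem.Dict.get?_mk_cons, sum_scaled]
  by_cases h1 : target = "Anxiety"
  · subst h1; simp only [reduceIte]; exact anx_case _
  · by_cases h2 : target = "Stress"
    · subst h2
      simp only [reduceIte]
      exact str_case _
    · by_cases h3 : target = "Depression"
      · subst h3
        simp only [reduceIte]
        exact dep_case _
      · simp [h1, h2, h3, Ne.symm h1, Ne.symm h2, Ne.symm h3, PySem.Dict.get?, List.find?]
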